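-- pv_equiv track=rewrite | github.com/smithkakar/dsa | data-structures/recursion/phrase_word_split.py | phrase_word_split
-- ===== SOURCE A (Python) =====
-- def phrase_word_split(phrase, list_of_words, output=None):
--     if output is None:
--         output = []
--
--     for word in list_of_words:
--         if phrase.startswith(word):
--             output.append(word)
--
--             # recursively call the fn on the remaining portion of the phrase
--             return phrase_word_split(phrase[len(word):], list_of_words, output)
--
--     return output
-- ===== SOURCE B (Python) =====
-- def phrase_word_split(phrase, list_of_words, output=None):
--     # Index-based bounded loop: no string slicing, no recursion.
--     # Each matched word is non-empty on meaningful inputs, so at most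
--     # len(phrase) matches can ever happen; iterate that many rounds.
--     if output is None:
--         output = []
--     i = 0
--     for _ in range(len(phrase)):
--         for word in list_of_words:
--             if phrase.startswith(word, i):
--                 output.append(word)
--                 i += len(word)
--                 break
--         else:
--             break
--     return output
-- ===== Notes on version B (the rewrite author's own statement) =====
-- stated objective: alternative
-- what changed: A's tail recursion with repeated string slicing is replaced by a single bounded index loop (at most len(phrase) rounds) that matches words at an offset via phrase.startswith(word, i), so no sliced copies of the phrase and no recursion.
import Mathlib
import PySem

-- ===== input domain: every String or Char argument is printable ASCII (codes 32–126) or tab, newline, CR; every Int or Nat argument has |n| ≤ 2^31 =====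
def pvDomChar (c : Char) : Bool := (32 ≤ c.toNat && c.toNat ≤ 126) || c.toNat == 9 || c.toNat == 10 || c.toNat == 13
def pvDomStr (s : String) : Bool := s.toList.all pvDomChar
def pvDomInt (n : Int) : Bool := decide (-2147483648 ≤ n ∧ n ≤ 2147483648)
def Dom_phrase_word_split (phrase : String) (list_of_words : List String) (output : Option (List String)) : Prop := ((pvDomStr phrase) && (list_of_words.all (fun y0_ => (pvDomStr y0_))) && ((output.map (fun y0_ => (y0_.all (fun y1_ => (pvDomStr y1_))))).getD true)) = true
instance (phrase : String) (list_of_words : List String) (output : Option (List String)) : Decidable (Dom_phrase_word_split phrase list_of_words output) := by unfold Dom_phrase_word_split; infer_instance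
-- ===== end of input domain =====

-- ===== PORT A =====
-- B replaces A's recursion-with-slicing by a single bounded index loop (no slicing, no recursion);
-- equivalence is about the RETURN value only: both Pythons also append to a caller-supplied `output` list in place.

-- A's inner `for word in list_of_words:` loop: scan the words in order; on the first
-- word that is a prefix, perform the recursive call `k word`; if none matches, return `output`.
def pwsScanA (phrase : List Char) (output : List String) (k : String → List String) : List String → List String
  | [] => output
  | w :: ws =>
      if PySem.Chars.startswith phrase w.toList then k w else pwsScanA phrase output k ws

-- A's recursion, totalized with fuel; under Pre_ ("" ∉ list_of_words) every recursive call
-- drops ≥ 1 character, so fuel = phrase.length + 1 never runs out on admitted inputs.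
-- `phrase[len(word):]` = `.drop w.toList.length` (slice from len(word)).
def pwsA (fuel : Nat) (phrase : List Char) (all : List String) (output : List String) : List String :=
  match fuel with
  | 0 => output
  | f + 1 =>
      pwsScanA phrase output
        (fun w => pwsA f (phrase.drop w.toList.length) all (output ++ [w])) all

def phrase_word_split (phrase : String) (list_of_words : List String) (output : Option (List String)) : List String :=
  -- `if output is None: output = []`
  pwsA (phrase.toList.length + 1) phrase.toList list_of_words (output.getD [])

-- ===== PORT B =====
-- One round of Source B's outer loop over state (i, output, active): the inner
-- `for word … break / else: break` is the first word matching at offset i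
-- (`phrase.startswith(word, i)` = startswith on the characters from i on);
-- `active = false` models having hit `break` (the remaining rounds do nothing).
def pwsStepB (cs : List Char) (all : List String) : Nat × List String × Bool → Nat × List String × Bool
  | (i, out, false) => (i, out, false)
  | (i, out, true) =>
      match all.find? (fun w => PySem.Chars.startswith (cs.drop i) w.toList) with
      | none => (i, out, false)
      | some w => (i + w.toList.length, out ++ [w], true)

def phrase_word_split_alt (phrase : String) (list_of_words : List String) (output : Option (List String)) : List String :=
  -- `for _ in range(len(phrase)):` driving the state machine above
  (((List.range phrase.toList.length).foldl
      (fun s _ => pwsStepB phrase.toList list_of_words s)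
      (0, output.getD [], true)).2).1

-- ===== PRECONDITION & SPEC =====
-- Pre_ excludes exactly the inputs with "" in list_of_words: there the empty word always matches
-- with zero advance and A recurses forever, raising RecursionError (it never returns a value).
def Pre_phrase_word_split (phrase : String) (list_of_words : List String) (output : Option (List String)) : Prop :=
  "" ∉ list_of_words
instance (phrase : String) (list_of_words : List String) (output : Option (List String)) : Decidable (Pre_phrase_word_split phrase list_of_words output) := by unfold Pre_phrase_word_split; infer_instance

def pvWitness_phrase_word_split : String × List String × Option (List String) := ("catdogcat", ["cat", "dog"], none)

def Spec_phrase_word_split (phrase : String) (list_of_words : List String) (output : Option (List String)) (out : List String) : Prop := out = phrase_word_split_alt phrase list_of_words output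
instance (phrase : String) (list_of_words : List String) (output : Option (List String)) (out : List String) : Decidable (Spec_phrase_word_split phrase list_of_words output out) := by unfold Spec_phrase_word_split; infer_instance

-- ===== CLAIM (what is proved, stated in full; the proofs are below) =====
def Claim_equal_phrase_word_split : Prop := ∀ (phrase : String) (list_of_words : List String) (output : Option (List String)), Dom_phrase_word_split phrase list_of_words output → Pre_phrase_word_split phrase list_of_words output → Spec_phrase_word_split phrase list_of_words output (phrase_word_split phrase list_of_words output)

-- ===== LEMMAS AND PROOFS =====
-- A fold whose body ignores the list elements is an iterate of the step function.
theorem foldl_ignore {α β : Type} (step : β → β) (l : List α) (s : β) :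
    l.foldl (fun s _ => step s) s = step^[l.length] s := by
  induction l generalizing s with
  | nil => rfl
  | cons a l ih => simp [List.foldl, ih, Function.iterate_succ_apply]

-- A's scan of the word list computes exactly the first match, i.e. List.find?.
theorem pwsScanA_eq_find? (phrase : List Char) (output : List String) (k : String → List String) (ws : List String) :
    pwsScanA phrase output k ws =
      match ws.find? (fun w => PySem.Chars.startswith phrase w.toList) with
      | none => output
      | some w => k w := by
  induction ws with
  | nil => rfl
  | cons w ws ih =>
      simp only [pwsScanA, List.find?]
      by_cases h : PySem.Chars.startswith phrase w.toList
      · simp [h]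
      · simp [h, ih]

theorem iterate_inactive (cs : List Char) (all : List String) (n : Nat) (i : Nat) (out : List String) :
    (pwsStepB cs all)^[n] (i, out, false) = (i, out, false) := by
  induction n with
  | zero => rfl
  | succ n ih => rw [Function.iterate_succ_apply]; exact ih

theorem toList_ne_nil (w : String) (h : w ≠ "") : w.toList ≠ [] := by
  intro h0
  exact h (by simpa [String.ofList_toList] using congrArg String.ofList h0)

theorem find?_nil_phrase (all : List String) (hall : "" ∉ all) :
    all.find? (fun w => PySem.Chars.startswith ([] : List Char) w.toList) = none := by
  rw [List.find?_eq_none]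
  intro w hw
  have hne : w.toList ≠ [] := toList_ne_nil w (fun h => hall (h ▸ hw))
  simp [PySem.Chars.startswith_iff, List.prefix_nil, hne]
  

theorem pwsA_eq_iter (all : List String) (cs : List Char) (hall : "" ∉ all) :
    ∀ (n f i : Nat) (out : List String), cs.length ≤ i + n → cs.length < i + f →
      pwsA f (cs.drop i) all out = (((pwsStepB cs all)^[n] (i, out, true)).2).1 := by
  intro n
  induction n with
  | zero =>
      intro f i out hn hf
      have hdrop : cs.drop i = [] := List.drop_eq_nil_iff.mpr (by omega)
      have hnone := find?_nil_phrase all hall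
      match f with
      | 0 => rfl
      | g + 1 =>
          simp only [pwsA, pwsScanA_eq_find?, hdrop, hnone]
          rfl
  | succ n ih =>
      intro f i out hn hf
      rw [Function.iterate_succ_apply]
      cases hfind : all.find? (fun w => PySem.Chars.startswith (cs.drop i) w.toList) with
      | none =>
          have hstep : pwsStepB cs all (i, out, true) = (i, out, false) := by
            simp [pwsStepB, hfind]
          rw [hstep, iterate_inactive]
          match f with
          | 0 => rfl
          | g + 1 => simp only [pwsA, pwsScanA_eq_find?, hfind]
      | some w =>
          have hmem : w ∈ all := List.mem_of_find?_eq_some hfind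
          have hsw : PySem.Chars.startswith (cs.drop i) w.toList = true := by
            have := List.find?_some hfind
            simpa using this
          have hwne : w.toList ≠ [] := toList_ne_nil w (fun h => hall (h ▸ hmem))
          have hlen : 1 ≤ w.toList.length := by
            cases h : w.toList with
            | nil => exact absurd h hwne
            | cons a l => simp
          have hpre : w.toList <+: cs.drop i := (PySem.Chars.startswith_iff _ _).1 hsw
          have hdropne : cs.drop i ≠ [] := by
            intro h0
            rw [h0] at hpre
            exact hwne (List.prefix_nil.1 hpre)
          have hi : i < cs.length := by
            by_contra hcon
            exact hdropne (List.drop_eq_nil_iff.mpr (by omega))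
          have hstep : pwsStepB cs all (i, out, true) = (i + w.toList.length, out ++ [w], true) := by
            simp [pwsStepB, hfind]
          rw [hstep]
          match f with
          | 0 => omega
          | g + 1 =>
              simp only [pwsA, pwsScanA_eq_find?, hfind]
              rw [List.drop_drop]
              rw [ih g (i + w.toList.length) (out ++ [w]) (by omega) (by omega)]

-- ===== VERDICT (by name: the statement is the Claim_ definition above) =====
theorem phrase_word_split_spec : Claim_equal_phrase_word_split := by
  intro phrase list_of_words output _ hpre
  unfold Spec_phrase_word_split phrase_word_split phrase_word_split_alt
  rw [foldl_ignore, List.length_range]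
  have := pwsA_eq_iter list_of_words phrase.toList hpre
    phrase.toList.length (phrase.toList.length + 1) 0 (output.getD []) (by omega) (by omega)
  simpa using this
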